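-- pv_equiv track=rewrite | github.com/aviAVIRAL/DP | Lec 7   Lis/L45.1 also rep  Compare function   .py | ff
-- ===== SOURCE A (Python) =====
-- def ff(s1, s2):
--     n = len(s1)
--     m = len(s2)
--
--     if n != m + 1:
--         return False
--
--     i = 0  # Pointer for s1
--     j = 0  # Pointer for s2
--
--     while i < n and j < m:
--         if s1[i] == s2[j]:
--             j += 1  # Move pointer in s2
--         i += 1  # Always move pointer in s1
--
--     return j == m  # s2 should be fully matched
-- ===== SOURCE B (Python) =====
-- def ff(s1, s2):
--     if len(s1) != len(s2) + 1:
--         return False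
--     return any(s1[:i] + s1[i + 1:] == s2 for i in range(len(s1)))
-- ===== Notes on version B (the rewrite author's own statement) =====
-- stated objective: alternative
-- what changed: Replaced the two-pointer greedy subsequence scan with a generate-and-test search: try deleting each character of s1 and check any resulting string equals s2.
import Mathlib
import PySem

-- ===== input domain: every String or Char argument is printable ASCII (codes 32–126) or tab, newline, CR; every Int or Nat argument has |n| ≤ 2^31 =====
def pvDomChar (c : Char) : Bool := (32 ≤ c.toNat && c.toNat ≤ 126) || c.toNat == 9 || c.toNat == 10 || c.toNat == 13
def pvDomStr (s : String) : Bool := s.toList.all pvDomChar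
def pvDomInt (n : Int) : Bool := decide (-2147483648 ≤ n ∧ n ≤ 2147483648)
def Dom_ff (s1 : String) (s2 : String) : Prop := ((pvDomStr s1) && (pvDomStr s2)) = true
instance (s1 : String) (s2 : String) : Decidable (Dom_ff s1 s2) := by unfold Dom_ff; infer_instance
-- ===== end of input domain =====

-- B replaces A's two-pointer greedy subsequence scan by a generate-and-test search over
-- all single-character deletions of s1; a different algorithm (O(n^2) vs O(n)), not faster.

-- ===== PORT A =====
-- the while loop: i advances every step, j advances on a match; 'return j == m'
-- becomes 'remaining part of s2 is empty'
def ffLoop : List Char → List Char → Bool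
  | _, [] => true
  | [], _ :: _ => false
  | c :: cs, d :: ds => if c = d then ffLoop cs ds else ffLoop cs (d :: ds)

def ff (s1 : String) (s2 : String) : Bool :=
  let n := PySem.Str.len s1
  let m := PySem.Str.len s2
  if n ≠ m + 1 then false
  else ffLoop s1.toList s2.toList

-- ===== PORT B =====
-- 'any(s1[:i] + s1[i+1:] == s2 for i in range(len(s1)))'
def ff_alt (s1 : String) (s2 : String) : Bool :=
  if PySem.Str.len s1 ≠ PySem.Str.len s2 + 1 then false
  else (PySem.List.pyRange 0 (PySem.Str.len s1) 1).any fun i =>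
    PySem.List.slice s1.toList none (some i) ++ PySem.List.slice s1.toList (some (i + 1)) none
      == s2.toList

-- ===== PRECONDITION & SPEC =====
def Spec_ff (s1 : String) (s2 : String) (out : Bool) : Prop := out = ff_alt s1 s2
instance (s1 : String) (s2 : String) (out : Bool) : Decidable (Spec_ff s1 s2 out) := by unfold Spec_ff; infer_instance

-- ===== CLAIM (what is proved, stated in full; the proofs are below) =====
def Claim_equal_ff : Prop := ∀ (s1 : String) (s2 : String), Dom_ff s1 s2 → Spec_ff s1 s2 (ff s1 s2)

-- ===== LEMMAS AND PROOFS =====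

-- A's greedy loop decides the sublist (subsequence) relation
theorem ffLoop_eq_sublist (a b : List Char) : ffLoop a b = decide (List.Sublist b a) := by
  induction a generalizing b with
  | nil =>
    cases b with
    | nil => simp [ffLoop]
    | cons d ds => simp [ffLoop]
  | cons c cs ih =>
    cases b with
    | nil => simp [ffLoop]
    | cons d ds =>
      simp only [ffLoop]
      by_cases hc : c = d
      · subst hc
        rw [if_pos rfl, ih ds]
        by_cases h : List.Sublist ds cs
        · simp [h, h.cons₂ c]
        · have : ¬ (List.Sublist (c :: ds) (c :: cs)) := by
            intro hcon
            cases hcon with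
            | cons _ h' => exact h ((List.sublist_cons_self c ds).trans h')
            | cons₂ _ h' => exact h h'
          simp [h, this]
      · rw [if_neg hc, ih (d :: ds)]
        have : (List.Sublist (d :: ds) (c :: cs)) ↔ (List.Sublist (d :: ds) cs) := by
          constructor
          · intro hcon
            cases hcon with
            | cons _ h' => exact h'
            | cons₂ _ h' => exact absurd rfl hc
          · exact fun h' => h'.cons c
        simp [this]

-- with |a| = |b| + 1, b is a sublist of a iff b is a with one index deleted
theorem sublist_succ_iff_eraseIdx (a b : List Char) (h : a.length = b.length + 1) :
    List.Sublist b a ↔ ∃ i, i < a.length ∧ a.eraseIdx i = b := by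
  constructor
  · intro hs
    induction a generalizing b with
    | nil => simp at h
    | cons c cs ih =>
      cases hs with
      | cons _ h' =>
        have : b = cs := h'.eq_of_length (by simpa using h.symm)
        exact ⟨0, by simp, by simp [this]⟩
      | cons₂ _ h' =>
        rename_i bs
        obtain ⟨i, hi, he⟩ := ih bs (by simpa using h) h'
        exact ⟨i + 1, by simpa using hi, by simp [List.eraseIdx, he]⟩
  · rintro ⟨i, _, rfl⟩
    exact List.eraseIdx_sublist a i

-- ===== VERDICT (by name: the statement is the Claim_ definition above) =====
theorem ff_spec : Claim_equal_ff := by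
  intro s1 s2 _
  unfold Spec_ff ff ff_alt
  simp only
  split
  · rfl
  · rename_i hguard
    have hlen : s1.toList.length = s2.toList.length + 1 := by
      by_contra hc
      apply hguard
      simp only [PySem.Str.len_eq]
      omega
    rw [ffLoop_eq_sublist]
    have hiff := sublist_succ_iff_eraseIdx s1.toList s2.toList hlen
    rcases Bool.eq_false_or_eq_true ((PySem.List.pyRange 0 (PySem.Str.len s1) 1).any fun i =>
        PySem.List.slice s1.toList none (some i) ++ PySem.List.slice s1.toList (some (i + 1)) none
          == s2.toList) with hany | hany
    · rw [hany]
      rw [List.any_eq_true] at hany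
      obtain ⟨x, hmem, hx⟩ := hany
      rw [PySem.List.mem_pyRange_one] at hmem
      obtain ⟨hx0, hxn⟩ := hmem
      apply decide_eq_true
      rw [hiff]
      refine ⟨x.toNat, ?_, ?_⟩
      · simp only [PySem.Str.len_eq] at hxn; omega
      · have hxeq : x = ((x.toNat : Nat) : Int) := by omega
        rw [hxeq] at hx
        rw [PySem.List.slice_to_natCast] at hx
        have h1 : ((x.toNat : Int) + 1) = ((x.toNat + 1 : Nat) : Int) := by push_cast; ring
        rw [h1, PySem.List.slice_from_natCast, beq_iff_eq] at hx
        rw [List.eraseIdx_eq_take_drop_succ]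
        exact hx
    · rw [hany]
      rw [List.any_eq_false] at hany
      apply decide_eq_false
      rw [hiff]
      rintro ⟨i, hi, he⟩
      have hmem : (i : Int) ∈ PySem.List.pyRange 0 (PySem.Str.len s1) 1 := by
        rw [PySem.List.mem_pyRange_one]
        constructor
        · exact_mod_cast Int.natCast_nonneg i
        · simp only [PySem.Str.len_eq]; exact_mod_cast hi
      have := hany _ hmem
      apply this
      rw [PySem.List.slice_to_natCast]
      have : ((i : Int) + 1) = ((i + 1 : Nat) : Int) := by push_cast; ring
      rw [this, PySem.List.slice_from_natCast]
      rw [beq_iff_eq, ← List.eraseIdx_eq_take_drop_succ]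
      exact he
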